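-- pv_equiv track=rewrite | github.com/pypi-data/pypi-mirror-314 | packages/REMI-z/remi_z-0.5.9.tar.gz/remi_z-0.5.9/remi_z/legacy_tokenizer.py | get_bar_pos
-- ===== SOURCE A (Python) =====
-- def get_bar_pos(tokens):
--     '''
--     Get the index of starting tokens of each bar, from remi tokens.
--     Specifically used for data preparation.
--
--     :param tokens:
--     :return:
--     '''
--     # Get the starting token of each bar
--     start_token_index_of_the_bar = 0
--     bar_id = 0
--     bar_start_token_indices = {}
--     # bars_token_positions[bar_id] = (start token index of this bar, start token index of next bar)
--     for idx, token in enumerate(tokens):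
--         if token == 'b-1':
--             start_token_index_of_next_bar = idx + 1
--             bar_start_token_indices[bar_id] = (start_token_index_of_the_bar, start_token_index_of_next_bar)
--
--             # Go to the next bar
--             start_token_index_of_the_bar = start_token_index_of_next_bar
--             bar_id = bar_id + 1
--     return bar_start_token_indices
-- ===== SOURCE B (Python) =====
-- def get_bar_pos(tokens):
--     # Recursive find-and-slice: locate the next 'b-1' with list.index, emit
--     # (pos, end) for that bar, and recurse on the remaining slice.
--     def go(pos, rest):
--         try:
--             k = rest.index('b-1')
--         except ValueError:
--             return []
--         end = pos + k + 1
--         return [(pos, end)] + go(end, rest[k + 1:])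
--     return dict(enumerate(go(0, tokens)))
-- ===== Notes on version B (the rewrite author's own statement) =====
-- stated objective: alternative
-- what changed: Replaces A's single element-by-element loop threading a running start index, bar counter and dict with a recursive find-and-slice: each step locates the next 'b-1' via list.index, emits one (start, end) pair, and recurses on the slice after the marker; the pairs are numbered by dict(enumerate(...)) at the end.
import Mathlib
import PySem

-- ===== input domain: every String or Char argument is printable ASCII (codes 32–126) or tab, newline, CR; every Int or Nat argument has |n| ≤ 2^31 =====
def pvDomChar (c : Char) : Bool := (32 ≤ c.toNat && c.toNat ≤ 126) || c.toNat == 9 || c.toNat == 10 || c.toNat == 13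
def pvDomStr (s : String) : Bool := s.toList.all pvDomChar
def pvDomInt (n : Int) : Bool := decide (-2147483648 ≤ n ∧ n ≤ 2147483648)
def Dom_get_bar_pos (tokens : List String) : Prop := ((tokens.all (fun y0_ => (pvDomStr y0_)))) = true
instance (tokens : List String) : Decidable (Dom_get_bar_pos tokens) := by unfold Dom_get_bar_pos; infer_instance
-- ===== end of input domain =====

-- B replaces A's single accumulating loop by a recursive find-and-slice using list.index — objective: alternative.

-- ===== PORT A =====
-- loop body of A's for-loop (state = (start_token_index_of_the_bar, bar_id, bar_start_token_indices))
def barStep (st : Int × Int × PySem.Dict Int (Int × Int)) (p : Int × String) :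
    Int × Int × PySem.Dict Int (Int × Int) :=
  if p.2 == "b-1" then
    (p.1 + 1, st.2.1 + 1, st.2.2.insert st.2.1 (st.1, p.1 + 1))
  else st

def get_bar_pos (tokens : List String) : List (Int × Int × Int) :=
  (((PySem.List.enumerate tokens 0).foldl barStep (0, 0, PySem.Dict.empty)).2.2).items

-- ===== PORT B =====
-- Source B's inner 'go': rest.index('b-1') (none = ValueError → return []), emit one pair, recurse on rest[k+1:]
def goBar (pos : Int) (rest : List String) : List (Int × Int) :=
  match h : PySem.List.index? rest "b-1" with
  | none => []
  | some k =>
      (pos, pos + (k : Int) + 1) ::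
        goBar (pos + (k : Int) + 1) (PySem.List.slice rest (some ((k : Int) + 1)) none)
termination_by rest.length
decreasing_by
  obtain ⟨hk, -, -⟩ := PySem.List.getElem_of_index?_eq_some h
  have he : ((k : Int) + 1) = ((k + 1 : Nat) : Int) := by push_cast; ring
  rw [he, PySem.List.slice_from_natCast]
  simp; omega

-- dict(enumerate(go(0, tokens)))
def get_bar_pos_alt (tokens : List String) : List (Int × Int × Int) :=
  (PySem.Dict.ofList (PySem.List.enumerate (goBar 0 tokens) 0)).items

-- ===== PRECONDITION & SPEC =====
def Spec_get_bar_pos (tokens : List String) (out : List (Int × Int × Int)) : Prop := out = get_bar_pos_alt tokens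
instance (tokens : List String) (out : List (Int × Int × Int)) : Decidable (Spec_get_bar_pos tokens out) := by unfold Spec_get_bar_pos; infer_instance

-- ===== CLAIM (what is proved, stated in full; the proofs are below) =====
def Claim_equal_get_bar_pos : Prop := ∀ (tokens : List String), Dom_get_bar_pos tokens → Spec_get_bar_pos tokens (get_bar_pos tokens)

-- ===== LEMMAS AND PROOFS =====

-- bar-end indices of the suffix enumerated from s
def barEnds (xs : List String) (s : Int) : List Int :=
  ((PySem.List.enumerate xs s).filter (fun p => p.2 == "b-1")).map (fun p => p.1 + 1)

lemma barEnds_nil (s : Int) : barEnds [] s = [] := by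
  simp [barEnds, PySem.List.enumerate_nil]

lemma barEnds_cons (x : String) (xs : List String) (s : Int) :
    barEnds (x :: xs) s =
      if x == "b-1" then (s + 1) :: barEnds xs (s + 1) else barEnds xs (s + 1) := by
  simp only [barEnds, PySem.List.enumerate_cons, List.filter_cons]
  split_ifs with h
  · simp
  · simp

-- a marker-free prefix contributes nothing to barEnds
lemma barEnds_append_no_marker (pre ys : List String) (s : Int)
    (hpre : "b-1" ∉ pre) :
    barEnds (pre ++ ys) s = barEnds ys (s + pre.length) := by
  induction pre generalizing s with
  | nil => simp
  | cons a pre ih =>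
    have ha : (a == "b-1") = false := by
      simp only [beq_eq_false_iff_ne, ne_eq]
      intro h; exact hpre (by simp [h])
    rw [List.cons_append, barEnds_cons, ha, if_neg (by simp), ih (s + 1) (by
      intro h; exact hpre (List.mem_cons_of_mem a h))]
    simp; ring_nf

lemma goBar_of_none (pos : Int) (rest : List String)
    (h : PySem.List.index? rest "b-1" = none) : goBar pos rest = [] := by
  rw [PySem.List.index?_eq_idxOf?] at h
  rw [goBar]
  split
  · rfl
  · next k heq =>
      rw [PySem.List.index?_eq_idxOf?] at heq
      simp [h] at heq

lemma goBar_of_some (pos : Int) (rest : List String) (k : Nat)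
    (h : PySem.List.index? rest "b-1" = some k) :
    goBar pos rest = (pos, pos + (k : Int) + 1) ::
        goBar (pos + (k : Int) + 1) (PySem.List.slice rest (some ((k : Int) + 1)) none) := by
  rw [PySem.List.index?_eq_idxOf?] at h
  rw [goBar]
  split
  · next heq =>
      rw [PySem.List.index?_eq_idxOf?] at heq
      simp [h] at heq
  · next k' heq =>
      rw [PySem.List.index?_eq_idxOf?] at heq
      rw [h] at heq
      injection heq with heq
      subst heq
      rfl

-- barEnds is empty when the marker is absent
lemma barEnds_eq_nil_of_not_mem (xs : List String) (hnm : "b-1" ∉ xs) :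
    ∀ (pos : Int), barEnds xs pos = [] := by
  induction xs with
  | nil => intro pos; exact barEnds_nil pos
  | cons a t iht =>
    intro pos
    rw [barEnds_cons]
    have ha : (a == "b-1") = false := by
      simp only [beq_eq_false_iff_ne, ne_eq]
      intro h; exact hnm (by simp [h])
    rw [ha, if_neg (by simp)]
    exact iht (fun h => hnm (List.mem_cons_of_mem a h)) (pos + 1)

-- the paired (start, end) list for a given first start and list of ends
lemma zip_starts_cons (pos q : Int) (E : List Int) :
    ((pos :: (q :: E).dropLast).zip (q :: E)) = (pos, q) :: ((q :: E.dropLast).zip E) := by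
  cases E with
  | nil => simp
  | cons e E' =>
    rw [List.dropLast_cons_of_ne_nil (by simp)]
    simp [List.zip_cons_cons]

-- characterization of B's recursion as the zipped (start, end) pairs
lemma goBar_eq (n : Nat) : ∀ (xs : List String), xs.length ≤ n → ∀ (pos : Int),
    goBar pos xs = ((pos :: (barEnds xs pos).dropLast).zip (barEnds xs pos)) := by
  induction n with
  | zero =>
    intro xs hlen pos
    have hx : xs = [] := List.eq_nil_of_length_eq_zero (Nat.le_zero.1 hlen)
    subst hx
    rw [goBar_of_none pos [] (by rw [PySem.List.index?_eq_none_iff]; simp)]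
    simp [barEnds_nil]
  | succ n ih =>
    intro xs hlen pos
    cases hidx : PySem.List.index? xs "b-1" with
    | none =>
      have hnm : "b-1" ∉ xs := (PySem.List.index?_eq_none_iff xs "b-1").1 hidx
      rw [goBar_of_none pos xs hidx, barEnds_eq_nil_of_not_mem xs hnm pos]
      simp
    | some k =>
      obtain ⟨pre, suf, hsplit, hklen, hpre⟩ := (PySem.List.index?_eq_some_iff xs "b-1" k).1 hidx
      subst hsplit; subst hklen
      have hslice : PySem.List.slice (pre ++ "b-1" :: suf) (some ((pre.length : Int) + 1)) none = suf := by
        have he : ((pre.length : Int) + 1) = ((pre.length + 1 : Nat) : Int) := by push_cast; ring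
        rw [he, PySem.List.slice_from_natCast]
        rw [show pre.length + 1 = pre.length + 1 from rfl, List.drop_append]
        simp
      have hsuflen : suf.length ≤ n := by
        simp only [List.length_append, List.length_cons] at hlen; omega
      have hends : barEnds (pre ++ "b-1" :: suf) pos
          = (pos + (pre.length : Int) + 1) :: barEnds suf (pos + (pre.length : Int) + 1) := by
        rw [barEnds_append_no_marker pre _ pos hpre, barEnds_cons]
        simp only [beq_self_eq_true, if_true]
      rw [goBar_of_some pos _ pre.length hidx, hslice, hends, zip_starts_cons]
      rw [ih suf hsuflen (pos + (pre.length : Int) + 1)]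

-- loop invariant for A's fold: it appends exactly the zipped (start, end) pairs for the suffix
lemma foldA_items (xs : List String) :
    ∀ (s start bid : Int) (d : PySem.Dict Int (Int × Int)),
      (∀ k ∈ d.keys, k < bid) →
      ((PySem.List.enumerate xs s).foldl barStep (start, bid, d)).2.2.items
        = d.items ++
          PySem.List.enumerate ((start :: (barEnds xs s).dropLast).zip (barEnds xs s)) bid := by
  induction xs with
  | nil =>
    intro s start bid d _
    simp [PySem.List.enumerate_nil, barEnds_nil]
  | cons x xs ih =>
    intro s start bid d hk
    rw [PySem.List.enumerate_cons, List.foldl_cons, barEnds_cons]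
    by_cases hx : x == "b-1"
    · have hnc : d.contains bid = false := by
        cases hcb : d.contains bid with
        | false => rfl
        | true =>
          have : bid ∈ d.keys := (PySem.Dict.contains_iff_mem_keys d bid).1 hcb
          exact absurd (hk bid this) (lt_irrefl bid)
      have hk' : ∀ k ∈ (d.insert bid (start, s + 1)).keys, k < bid + 1 := by
        intro k hkmem
        rw [PySem.Dict.keys_insert_of_not_contains d _ hnc] at hkmem
        rcases List.mem_append.1 hkmem with h | h
        · exact lt_trans (hk k h) (by omega)
        · simp at h; omega
      rw [if_pos hx]
      simp only [barStep, hx, if_true]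
      rw [ih (s + 1) (s + 1) (bid + 1) _ hk']
      rw [PySem.Dict.items_insert_of_not_contains d _ hnc]
      rcases hE : barEnds xs (s + 1) with _ | ⟨e, E⟩
      · simp [List.zip, PySem.List.enumerate_cons, PySem.List.enumerate_nil]
      · have : (((s + 1) :: e :: E).dropLast) = (s + 1) :: (e :: E).dropLast := by
          rw [List.dropLast_cons_of_ne_nil (by simp)]
        rw [this]
        simp [List.zip_cons_cons, PySem.List.enumerate_cons, List.append_assoc]
    · rw [if_neg hx]
      simp only [barStep, hx]
      exact ih (s + 1) start bid d hk

-- dict(enumerate(L)) lists exactly enumerate(L): all keys are fresh and distinct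
lemma items_ofList_enumerate (L : List (Int × Int)) :
    (PySem.Dict.ofList (PySem.List.enumerate L 0)).items = PySem.List.enumerate L 0 := by
  have hnodup : (List.map Prod.fst (PySem.List.enumerate L 0)).Nodup := by
    have hp := PySem.List.pairwise_lt_enumerate L 0
    exact (List.pairwise_map.2 hp).imp ne_of_lt
  have h := PySem.Dict.items_foldl_insert_fresh (PySem.List.enumerate L 0) Prod.fst Prod.snd
      PySem.Dict.empty (by intro a _; simp) hnodup
  simpa [PySem.Dict.ofList, PySem.Dict.update, PySem.Dict.empty] using h

-- ===== VERDICT (by name: the statement is the Claim_ definition above) =====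
theorem get_bar_pos_spec : Claim_equal_get_bar_pos := by
  intro tokens _
  unfold Spec_get_bar_pos get_bar_pos get_bar_pos_alt
  rw [foldA_items tokens 0 0 0 PySem.Dict.empty (by simp [PySem.Dict.keys_empty])]
  rw [goBar_eq tokens.length tokens (le_refl _) 0]
  rw [items_ofList_enumerate]
  simp [PySem.Dict.empty]
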